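-- pv_equiv track=rewrite | github.com/LuismiBQ/dateparser-kata | DateParser.py | atMostOneHave4Digits
-- ===== SOURCE A (Python) =====
-- def atMostOneHave4Digits(dateElements):
--   fourDigitsAlreadyExists = False
--
--   for element in dateElements:
--     elementLength = len(element)
--
--     if  elementLength > 2 or elementLength == 0:
--       if elementLength == 4 and not fourDigitsAlreadyExists:
--         fourDigitsAlreadyExists = True
--       else:
--         return False
--
--   return True
-- ===== SOURCE B (Python) =====
-- def atMostOneHave4Digits(dateElements):
--   lengths = [len(e) for e in dateElements]
--   if any(l not in (1, 2, 4) for l in lengths):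
--     return False
--   return lengths.count(4) <= 1
-- ===== Notes on version B (the rewrite author's own statement) =====
-- stated objective: simpler
-- what changed: Replaces the single early-exit loop carrying a seen-a-4-digit flag with a lengths table followed by two declarative checks: all lengths in {1,2,4}, and at most one length equals 4.
import Mathlib
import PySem

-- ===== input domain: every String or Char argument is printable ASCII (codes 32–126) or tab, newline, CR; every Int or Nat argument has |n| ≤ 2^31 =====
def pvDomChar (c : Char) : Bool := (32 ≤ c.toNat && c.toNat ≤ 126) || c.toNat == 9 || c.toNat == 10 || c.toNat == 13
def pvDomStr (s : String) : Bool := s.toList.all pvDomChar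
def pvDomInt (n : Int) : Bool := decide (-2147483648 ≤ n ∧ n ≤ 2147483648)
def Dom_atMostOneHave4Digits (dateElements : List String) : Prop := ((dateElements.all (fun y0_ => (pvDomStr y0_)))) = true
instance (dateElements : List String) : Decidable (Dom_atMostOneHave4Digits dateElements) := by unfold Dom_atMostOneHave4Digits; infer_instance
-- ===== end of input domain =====

-- ===== PORT A =====
-- B changes decomposition only: a lengths table + two declarative checks instead of A's early-exit flag loop.
def pvGoA : List String → Bool → Bool
  | [], _ => true
  | e :: rest, fourDigitsAlreadyExists =>
    let elementLength := PySem.Str.len e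
    if elementLength > 2 || elementLength == 0 then
      if elementLength == 4 && !fourDigitsAlreadyExists then pvGoA rest true
      else false
    else pvGoA rest fourDigitsAlreadyExists

def atMostOneHave4Digits (dateElements : List String) : Bool :=
  pvGoA dateElements false

-- ===== PORT B =====
def atMostOneHave4Digits_alt (dateElements : List String) : Bool :=
  let lengths := dateElements.map (fun e => PySem.Str.len e)
  if lengths.any (fun l => !(l == 1 || l == 2 || l == 4)) then false
  else decide (PySem.List.count lengths 4 ≤ 1)

-- ===== PRECONDITION & SPEC =====
def Spec_atMostOneHave4Digits (dateElements : List String) (out : Bool) : Prop := out = atMostOneHave4Digits_alt dateElements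
instance (dateElements : List String) (out : Bool) : Decidable (Spec_atMostOneHave4Digits dateElements out) := by unfold Spec_atMostOneHave4Digits; infer_instance

-- ===== CLAIM (what is proved, stated in full; the proofs are below) =====
def Claim_equal_atMostOneHave4Digits : Prop := ∀ (dateElements : List String), Dom_atMostOneHave4Digits dateElements → Spec_atMostOneHave4Digits dateElements (atMostOneHave4Digits dateElements)

-- ===== LEMMAS AND PROOFS =====

-- ===== VERDICT (by name: the statement is the Claim_ definition above) =====
lemma pvAnyNot (l : List Int) (q : Int → Bool) : l.any (fun x => !(q x)) = !l.all q := by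
  induction l with
  | nil => rfl
  | cons a t ih => simp [List.any_cons, List.all_cons, ih]

lemma pvGoA_eq (xs : List String) (flag : Bool) :
    pvGoA xs flag =
      (((xs.map (fun e => PySem.Str.len e)).all (fun l => l == 1 || l == 2 || l == 4)) &&
        decide (PySem.List.count (xs.map (fun e => PySem.Str.len e)) 4 ≤ (if flag then 0 else 1))) := by
  induction xs generalizing flag with
  | nil => cases flag <;> simp [pvGoA, PySem.List.count]
  | cons e rest ih =>
    have hlen : PySem.Str.len e = (e.toList.length : Int) := by
      simp [PySem.Str.len_eq]
    simp only [pvGoA, List.map_cons, List.all_cons, PySem.List.count, List.count_cons]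
    rw [ih true, ih flag]
    rcases flag <;>
      by_cases h0 : e.toList.length = 0 <;>
      by_cases h1 : e.toList.length = 1 <;>
      by_cases h2 : e.toList.length = 2 <;>
      by_cases h4 : e.toList.length = 4 <;>
      simp_all [PySem.List.count] <;>
    · have h0' : e.length ≠ 0 := by simp_all
      have h3 : 2 < e.length := by omega
      have h1' : ((e.length : Int) ≠ 1) := by exact_mod_cast h1
      have h2' : ((e.length : Int) ≠ 2) := by exact_mod_cast h2
      have h4' : ((e.length : Int) ≠ 4) := by exact_mod_cast h4
      simp [h3, h1', h2', h4']

theorem atMostOneHave4Digits_spec : Claim_equal_atMostOneHave4Digits := by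
  intro xs _
  unfold Spec_atMostOneHave4Digits atMostOneHave4Digits atMostOneHave4Digits_alt
  rw [pvGoA_eq]
  simp only [pvAnyNot]
  cases hall : (xs.map (fun e => PySem.Str.len e)).all (fun l => l == 1 || l == 2 || l == 4) <;>
    simp
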